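-- pv_equiv track=rewrite | github.com/Eminentpaul/Drift | user_auth/validation.py | phone_number_validation
-- ===== SOURCE A (Python) =====
-- def phone_number_validation(number):
--     non = list(number)
--     non.reverse()
--     new_number = []
--
--     for i in non:
--         if i != ' ':
--             if len(new_number) == 10:
--                 break
--             else: new_number.append(i)
--
--
--     new_number.reverse()
--     new_number = ''.join([x for x in new_number])
--
--     return new_number
-- ===== SOURCE B (Python) =====
-- def phone_number_validation(number):
--     kept = [c for c in number if c != ' ']
--     return ''.join(kept[-10:])
-- ===== Notes on version B (the rewrite author's own statement) =====
-- stated objective: simpler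
-- what changed: Replaces A's reverse/collect-until-10-with-early-break/reverse pipeline by a single forward space filter followed by a last-10 slice.
import Mathlib
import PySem

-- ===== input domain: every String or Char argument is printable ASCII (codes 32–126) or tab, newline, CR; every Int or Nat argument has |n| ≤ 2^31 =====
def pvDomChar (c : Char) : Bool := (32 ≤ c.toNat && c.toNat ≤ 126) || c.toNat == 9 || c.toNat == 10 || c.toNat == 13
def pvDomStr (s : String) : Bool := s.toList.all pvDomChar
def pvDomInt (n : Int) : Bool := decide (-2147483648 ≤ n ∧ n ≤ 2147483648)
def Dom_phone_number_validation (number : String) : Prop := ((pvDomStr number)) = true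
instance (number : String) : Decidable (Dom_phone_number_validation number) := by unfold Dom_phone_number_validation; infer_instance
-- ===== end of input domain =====

-- B replaces A's reverse/collect-until-10-with-early-break/reverse pipeline by a
-- forward space filter followed by a last-10 slice (objective: simpler).

-- ===== PORT A =====
-- A's for-loop over the reversed characters, with the early break at 10 collected chars
def pvLoopA : List Char → List Char → List Char
  | [], acc => acc
  | c :: rest, acc =>
    if c != ' ' then
      if acc.length = 10 then acc
      else pvLoopA rest (acc ++ [c])
    else pvLoopA rest acc

def phone_number_validation (number : String) : String :=
  let non := number.toList.reverse
  let new_number := pvLoopA non []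
  String.ofList new_number.reverse

-- ===== PORT B =====
def phone_number_validation_alt (number : String) : String :=
  let kept := number.toList.filter (fun c => c != ' ')
  String.ofList (PySem.List.slice kept (some (-10)) none)   -- kept[-10:]

-- ===== PRECONDITION & SPEC =====
def Spec_phone_number_validation (number : String) (out : String) : Prop := out = phone_number_validation_alt number
instance (number : String) (out : String) : Decidable (Spec_phone_number_validation number out) := by unfold Spec_phone_number_validation; infer_instance

-- ===== CLAIM (what is proved, stated in full; the proofs are below) =====
def Claim_equal_phone_number_validation : Prop := ∀ (number : String), Dom_phone_number_validation number → Spec_phone_number_validation number (phone_number_validation number)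

-- ===== LEMMAS AND PROOFS =====
theorem pvLoopA_eq (l acc : List Char) (h : acc.length ≤ 10) :
    pvLoopA l acc = acc ++ (l.filter (fun c => c != ' ')).take (10 - acc.length) := by
  induction l generalizing acc with
  | nil => simp [pvLoopA]
  | cons c rest ih =>
    by_cases hc : c = ' '
    · simp [pvLoopA, hc, ih acc h]
    · have hcb : (c != ' ') = true := by simp [hc]
      by_cases hlen : acc.length = 10
      · simp [pvLoopA, hcb, hlen]
      · have hlt : acc.length < 10 := lt_of_le_of_ne h hlen
        rw [pvLoopA, if_pos hcb, if_neg hlen, ih (acc ++ [c]) (by simp; omega)]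
        simp
        rw [List.filter_cons, if_pos hcb,
          show 10 - acc.length = (9 - acc.length) + 1 by omega, List.take_succ_cons]

theorem reverse_take_reverse (xs : List Char) (n : Nat) :
    (xs.reverse.take n).reverse = xs.drop (xs.length - n) := by
  induction xs with
  | nil => simp
  | cons x rest ih =>
    by_cases h : rest.length + 1 ≤ n
    · rw [List.take_of_length_le (by simpa using h)]
      simp [Nat.sub_eq_zero_of_le h]
    · have hn : n ≤ rest.length := by omega
      rw [List.reverse_cons]
      rw [List.take_append_of_le_length (by simpa using hn)]
      rw [ih, show (x :: rest).length - n = (rest.length - n) + 1 by simp; omega, List.drop_succ_cons]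

-- ===== VERDICT (by name: the statement is the Claim_ definition above) =====
theorem phone_number_validation_spec : Claim_equal_phone_number_validation := by
  intro number _
  unfold Spec_phone_number_validation phone_number_validation phone_number_validation_alt
  simp only
  rw [pvLoopA_eq _ [] (by simp), List.filter_reverse, List.nil_append,
    PySem.List.slice_from_neg_ofNat _ 10 (by omega), reverse_take_reverse]
  simp
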